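-- pv_equiv track=rewrite | github.com/basvasilich/study_algorithms-toolbox | Greedy Algorithms/Car Fueling/car_fueling.py | compute_min_number_of_refills
-- ===== SOURCE A (Python) =====
-- def compute_min_number_of_refills(d, m, stops):
--     assert 1 <= d <= 10 ** 5
--     assert 1 <= m <= 400
--     assert 1 <= len(stops) <= 300
--     assert 0 < stops[0] and all(stops[i] < stops[i + 1] for i in range(len(stops) - 1)) and stops[-1] < d
--
--     refillings = 0
--     current_stop = 0
--
--     stops.append(d)
--     stops.insert(0, 0)
--
--     while stops[current_stop] < d:
--         last_stop = current_stop
--         while current_stop < len(stops) - 1 and stops[current_stop + 1] - stops[last_stop] <= m: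
--             current_stop += 1
--         if last_stop == current_stop:
--             return -1
--         if stops[current_stop] < d:
--             refillings += 1
--
--     return refillings
-- ===== SOURCE B (Python) =====
-- def compute_min_number_of_refills(d, m, stops):
--     assert 1 <= d <= 10 ** 5
--     assert 1 <= m <= 400
--     assert 1 <= len(stops) <= 300
--     assert 0 < stops[0] and all(stops[i] < stops[i + 1] for i in range(len(stops) - 1)) and stops[-1] < d
--
--     stops.append(d)
--     stops.insert(0, 0)
--
--     refills = 0
--     last = stops[0]
--     for i in range(1, len(stops)):
--         if stops[i] - last > m:
--             refills += 1
--             last = stops[i - 1]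
--             if stops[i] - last > m:
--                 return -1
--     return refills
-- ===== Notes on version B (the rewrite author's own statement) =====
-- stated objective: simpler
-- what changed: Replaces A's nested while loops (outer loop plus inner 'advance as far as reachable' scan with last_stop bookkeeping) by a single flat forward pass that lazily refuels at the previous stop when the next stop is out of range.
import Mathlib
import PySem

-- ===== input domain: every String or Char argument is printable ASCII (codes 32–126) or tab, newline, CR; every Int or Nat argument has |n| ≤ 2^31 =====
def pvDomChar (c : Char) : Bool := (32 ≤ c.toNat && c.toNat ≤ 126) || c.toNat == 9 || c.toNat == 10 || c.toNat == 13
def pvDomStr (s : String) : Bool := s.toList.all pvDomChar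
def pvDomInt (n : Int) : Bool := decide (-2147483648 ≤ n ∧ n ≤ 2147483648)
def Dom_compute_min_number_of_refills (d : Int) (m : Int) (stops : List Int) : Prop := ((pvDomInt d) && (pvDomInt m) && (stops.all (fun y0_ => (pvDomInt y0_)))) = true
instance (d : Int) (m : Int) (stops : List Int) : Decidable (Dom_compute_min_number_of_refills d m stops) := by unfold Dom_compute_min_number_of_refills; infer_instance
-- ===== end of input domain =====

-- B replaces A's nested greedy 'jump as far as possible' loops by one flat forward scan that
-- refuels lazily at the previous stop (same O(n) cost; simpler).  Both Pythons mutate `stops`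
-- in place identically (append d, insert 0); the equivalence proved here is about the return value.

-- ===== PORT A =====
-- inner while loop of A: advance current_stop while the next stop is reachable from stops[last_stop]
def innerA (xs : List Int) (m lastVal : Int) (cs : Nat) : Nat :=
  if h : cs < xs.length - 1 ∧ xs.getD (cs + 1) 0 - lastVal ≤ m then
    innerA xs m lastVal (cs + 1)
  else cs
termination_by xs.length - cs
decreasing_by omega

-- (cited by outerA's decreasing_by) the inner loop never moves backwards
theorem innerA_ge (xs : List Int) (m v : Int) (cs : Nat) : cs ≤ innerA xs m v cs := by
  fun_induction innerA <;> omega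

-- (cited by outerA's decreasing_by) if the inner loop moved, cs was not the last index
theorem innerA_moved (xs : List Int) (m v : Int) (cs : Nat)
    (h : innerA xs m v cs ≠ cs) : cs < xs.length - 1 := by
  by_cases hc : cs < xs.length - 1 ∧ xs.getD (cs + 1) 0 - v ≤ m
  · exact hc.1
  · rw [innerA, dif_neg hc] at h; exact absurd rfl h

-- outer while loop of A
def outerA (xs : List Int) (d m : Int) (cs : Nat) (refills : Int) : Int :=
  if xs.getD cs 0 < d then
    if h : innerA xs m (xs.getD cs 0) cs = cs then -1
    else outerA xs d m (innerA xs m (xs.getD cs 0) cs)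
      (if xs.getD (innerA xs m (xs.getD cs 0) cs) 0 < d then refills + 1 else refills)
  else refills
termination_by xs.length - cs
decreasing_by
  have h1 := innerA_ge xs m (xs.getD cs 0) cs
  have h2 := innerA_moved xs m (xs.getD cs 0) cs h
  omega

-- the asserts: when one fails Python raises AssertionError (excluded by Pre_); value then irrelevant
def compute_min_number_of_refills (d : Int) (m : Int) (stops : List Int) : Int :=
  if 1 ≤ d ∧ d ≤ 100000 ∧ 1 ≤ m ∧ m ≤ 400 ∧ 1 ≤ stops.length ∧ stops.length ≤ 300 ∧
      List.IsChain (fun a b : Int => a < b) (0 :: (stops ++ [d])) then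
    outerA (0 :: (stops ++ [d])) d m 0 0
  else 0

-- ===== PORT B =====
-- B's single forward for-loop over range(1, len(stops)) after the same mutation
def loopB (xs : List Int) (m : Int) (i : Nat) (last refills : Int) : Int :=
  if i < xs.length then
    if m < xs.getD i 0 - last then
      if m < xs.getD i 0 - xs.getD (i - 1) 0 then -1
      else loopB xs m (i + 1) (xs.getD (i - 1) 0) (refills + 1)
    else loopB xs m (i + 1) last refills
  else refills
termination_by xs.length - i

def compute_min_number_of_refills_alt (d : Int) (m : Int) (stops : List Int) : Int :=
  if 1 ≤ d ∧ d ≤ 100000 ∧ 1 ≤ m ∧ m ≤ 400 ∧ 1 ≤ stops.length ∧ stops.length ≤ 300 ∧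
      List.IsChain (fun a b : Int => a < b) (0 :: (stops ++ [d])) then
    loopB (0 :: (stops ++ [d])) m 1 ((0 :: (stops ++ [d])).getD 0 0) 0
  else 0

-- ===== PRECONDITION & SPEC =====
-- Pre_ = exactly the inputs on which all four asserts of A hold (otherwise Python raises
-- AssertionError and returns nothing); given len(stops) ≥ 1, the chain condition on
-- 0 :: stops ++ [d] is literally '0 < stops[0] and stops strictly increasing and stops[-1] < d'.
def Pre_compute_min_number_of_refills (d : Int) (m : Int) (stops : List Int) : Prop :=
  1 ≤ d ∧ d ≤ 100000 ∧ 1 ≤ m ∧ m ≤ 400 ∧ 1 ≤ stops.length ∧ stops.length ≤ 300 ∧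
    List.IsChain (fun a b : Int => a < b) (0 :: (stops ++ [d]))
instance (d : Int) (m : Int) (stops : List Int) : Decidable (Pre_compute_min_number_of_refills d m stops) := by
  unfold Pre_compute_min_number_of_refills; infer_instance

def pvWitness_compute_min_number_of_refills : Int × Int × List Int := (10, 4, [3, 6])

def Spec_compute_min_number_of_refills (d : Int) (m : Int) (stops : List Int) (out : Int) : Prop := out = compute_min_number_of_refills_alt d m stops
instance (d : Int) (m : Int) (stops : List Int) (out : Int) : Decidable (Spec_compute_min_number_of_refills d m stops out) := by unfold Spec_compute_min_number_of_refills; infer_instance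

-- ===== CLAIM (what is proved, stated in full; the proofs are below) =====
def Claim_equal_compute_min_number_of_refills : Prop := ∀ (d : Int) (m : Int) (stops : List Int), Dom_compute_min_number_of_refills d m stops → Pre_compute_min_number_of_refills d m stops → Spec_compute_min_number_of_refills d m stops (compute_min_number_of_refills d m stops)

-- ===== LEMMAS AND PROOFS =====

-- B's loop skips over a stretch with no unreachable stop without changing anything
theorem loopB_skip (xs : List Int) (m last r : Int) :
    ∀ (k i i' : Nat), i' - i ≤ k → i ≤ i' →
      (∀ j, i ≤ j → j < i' → xs.getD j 0 - last ≤ m) →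
      loopB xs m i last r = loopB xs m i' last r := by
  intro k
  induction k with
  | zero =>
    intro i i' h1 h2 _
    have h : i = i' := by omega
    subst h
    rfl
  | succ k ih =>
    intro i i' h1 h2 hno
    by_cases hii : i = i'
    · rw [hii]
    · have hlt : i < i' := by omega
      by_cases hin : i < xs.length
      · have hnt : ¬ m < xs.getD i 0 - last := by have := hno i le_rfl hlt; omega
        rw [loopB, if_pos hin, if_neg hnt]
        exact ih (i + 1) i' (by omega) (by omega) (fun j hj hj' => hno j (by omega) hj')
      · rw [loopB, if_neg hin, loopB, if_neg (by omega : ¬ i' < xs.length)]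

-- every step the inner loop takes was a reachable one
theorem innerA_no_trig (xs : List Int) (m v : Int) (cs : Nat) :
    ∀ j, cs ≤ j → j < innerA xs m v cs → xs.getD (j + 1) 0 - v ≤ m := by
  fun_induction innerA with
  | case1 cs h ih =>
    intro j h1 h2
    rcases Nat.eq_or_lt_of_le h1 with h1' | h1'
    · rw [← h1']; exact h.2
    · exact ih j h1' h2
  | case2 cs h => intro j h1 h2; omega

-- where the inner loop stops, its condition fails
theorem innerA_stop (xs : List Int) (m v : Int) (cs : Nat) :
    ¬ (innerA xs m v cs < xs.length - 1 ∧ xs.getD (innerA xs m v cs + 1) 0 - v ≤ m) := by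
  fun_induction innerA with
  | case1 cs h ih => exact ih
  | case2 cs h => exact h

theorem innerA_le (xs : List Int) (m v : Int) (cs : Nat) :
    cs ≤ xs.length - 1 → innerA xs m v cs ≤ xs.length - 1 := by
  fun_induction innerA with
  | case1 cs h ih => intro _; exact ih (by omega)
  | case2 cs h => intro h'; exact h'

-- the heart of the file: A's jump-greedy outer loop equals B's flat scan, for any strictly
-- increasing xs whose last entry is d
theorem outerA_eq_loopB (xs : List Int) (d m : Int)
    (hmono : ∀ i j, i < j → j < xs.length → xs.getD i 0 < xs.getD j 0)
    (hlast : xs.getD (xs.length - 1) 0 = d) :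
    ∀ (k : Nat) (cs : Nat) (r : Int), xs.length - cs ≤ k → cs < xs.length - 1 →
      outerA xs d m cs r = loopB xs m (cs + 1) (xs.getD cs 0) r := by
  have hlt : ∀ j, j < xs.length - 1 → xs.getD j 0 < d := by
    intro j hj
    have := hmono j (xs.length - 1) hj (by omega)
    omega
  intro k
  induction k with
  | zero => intro cs r h1 h2; omega
  | succ k ih =>
    intro cs r hk hcs
    have hge := innerA_ge xs m (xs.getD cs 0) cs
    have hle := innerA_le xs m (xs.getD cs 0) cs (by omega)
    have hstop := innerA_stop xs m (xs.getD cs 0) cs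
    have hnt := innerA_no_trig xs m (xs.getD cs 0) cs
    rw [outerA, if_pos (hlt cs hcs)]
    by_cases h0 : innerA xs m (xs.getD cs 0) cs = cs
    · rw [dif_pos h0]
      rw [h0] at hstop
      have htrig : m < xs.getD (cs + 1) 0 - xs.getD cs 0 := by
        by_cases h' : xs.getD (cs + 1) 0 - xs.getD cs 0 ≤ m
        · exact absurd ⟨hcs, h'⟩ hstop
        · omega
      rw [loopB, if_pos (by omega : cs + 1 < xs.length), if_pos htrig,
        (by omega : cs + 1 - 1 = cs), if_pos htrig]
    · rw [dif_neg h0]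
      have hlt' : cs < innerA xs m (xs.getD cs 0) cs := by omega
      set cs' := innerA xs m (xs.getD cs 0) cs with hcs'
      have hskip : loopB xs m (cs + 1) (xs.getD cs 0) r = loopB xs m (cs' + 1) (xs.getD cs 0) r := by
        apply loopB_skip xs m (xs.getD cs 0) r (cs' + 1 - (cs + 1)) _ _ le_rfl (by omega)
        intro j hj hj'
        have := hnt (j - 1) (by omega) (by omega)
        rw [(by omega : j - 1 + 1 = j)] at this
        exact this
      rw [hskip]
      by_cases hE : cs' = xs.length - 1
      · have hnd : ¬ xs.getD cs' 0 < d := by rw [hE, hlast]; exact lt_irrefl d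
        rw [if_neg hnd, outerA, if_neg hnd, loopB,
          if_neg (by omega : ¬ cs' + 1 < xs.length)]
      · have hcs'lt : cs' < xs.length - 1 := by omega
        have hvd : xs.getD cs' 0 < d := hlt cs' hcs'lt
        rw [if_pos hvd]
        have htrig' : m < xs.getD (cs' + 1) 0 - xs.getD cs 0 := by
          by_cases h' : xs.getD (cs' + 1) 0 - xs.getD cs 0 ≤ m
          · exact absurd ⟨hcs'lt, h'⟩ hstop
          · omega
        rw [loopB, if_pos (by omega : cs' + 1 < xs.length), if_pos htrig',
          (by omega : cs' + 1 - 1 = cs')]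
        by_cases hT : m < xs.getD (cs' + 1) 0 - xs.getD cs' 0
        · rw [if_pos hT, outerA, if_pos hvd, dif_pos]
          rw [innerA, dif_neg (by omega : ¬ (cs' < xs.length - 1 ∧ xs.getD (cs' + 1) 0 - xs.getD cs' 0 ≤ m))]
        · rw [if_neg hT]
          rw [ih cs' (r + 1) (by omega) hcs'lt]
          rw [loopB, if_pos (by omega : cs' + 1 < xs.length), if_neg hT]

-- getD at the last position of 0 :: (l ++ [b])
theorem getD_last_cons_append (l : List Int) (a b : Int) :
    (a :: (l ++ [b])).getD (l.length + 1) 0 = b := by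
  induction l generalizing a with
  | nil => rfl
  | cons x t ih => exact ih x

-- ===== VERDICT (by name: the statement is the Claim_ definition above) =====
theorem compute_min_number_of_refills_spec : Claim_equal_compute_min_number_of_refills := by
  intro d m stops _hdom hpre
  unfold Pre_compute_min_number_of_refills at hpre
  unfold Spec_compute_min_number_of_refills
  unfold compute_min_number_of_refills compute_min_number_of_refills_alt
  rw [if_pos hpre, if_pos hpre]
  obtain ⟨h1, h2, h3, h4, h5, h6, hchain⟩ := hpre
  have hpair : List.Pairwise (fun a b : Int => a < b) (0 :: (stops ++ [d])) :=
    List.isChain_iff_pairwise.1 hchain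
  have hlen : (0 :: (stops ++ [d])).length = stops.length + 2 := by simp
  have hmono : ∀ i j, i < j → j < (0 :: (stops ++ [d])).length →
      (0 :: (stops ++ [d])).getD i 0 < (0 :: (stops ++ [d])).getD j 0 := by
    intro i j hij hj
    have hgi := List.pairwise_iff_getElem.1 hpair i j (by omega) hj hij
    rw [List.getD_eq_getElem?_getD, List.getD_eq_getElem?_getD,
      List.getElem?_eq_getElem (by omega : i < (0 :: (stops ++ [d])).length),
      List.getElem?_eq_getElem hj]
    exact hgi
  have hlast : (0 :: (stops ++ [d])).getD ((0 :: (stops ++ [d])).length - 1) 0 = d := by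
    rw [hlen, (by omega : stops.length + 2 - 1 = stops.length + 1)]
    exact getD_last_cons_append stops 0 d
  have h00 : ((0 :: (stops ++ [d])) : List Int).getD 0 0 = 0 := rfl
  rw [h00]
  exact (outerA_eq_loopB (0 :: (stops ++ [d])) d m hmono hlast
    (0 :: (stops ++ [d])).length 0 0 (by omega) (by omega)).symm ▸ rfl
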